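-- pv_equiv track=rewrite | github.com/IumoInfinium/cp | google_competitions/farewell_round_A/rainbow_sort.py | solve
-- ===== SOURCE A (Python) =====
-- def solve(s):
--     ans = []
--     ans_sett = set()
--
--     for c in s:
--         if(c not in ans_sett):
--             ans_sett.add(c)
--             ans.append(c)
--         elif c == ans[-1]:
--             continue
--         else: return False, []
--     return True, ans
-- ===== SOURCE B (Python) =====
-- def solve(s):
--     # Phase 1: run-length compression keys (one entry per maximal run of equal chars).
--     keys = []
--     for c in s:
--         if keys[-1:] != [c]:
--             keys.append(c)
--     # Phase 2: grouped contiguously iff all run keys are distinct.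
--     if len(set(keys)) == len(keys):
--         return True, keys
--     return False, []
-- ===== Notes on version B (the rewrite author's own statement) =====
-- stated objective: simpler
-- what changed: Replaces A's single scan with seen-set membership, last-element comparison and early return by a two-phase decomposition: first build the run-length key list, then return (True, keys) iff the keys are all distinct, else (False, []).
import Mathlib
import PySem

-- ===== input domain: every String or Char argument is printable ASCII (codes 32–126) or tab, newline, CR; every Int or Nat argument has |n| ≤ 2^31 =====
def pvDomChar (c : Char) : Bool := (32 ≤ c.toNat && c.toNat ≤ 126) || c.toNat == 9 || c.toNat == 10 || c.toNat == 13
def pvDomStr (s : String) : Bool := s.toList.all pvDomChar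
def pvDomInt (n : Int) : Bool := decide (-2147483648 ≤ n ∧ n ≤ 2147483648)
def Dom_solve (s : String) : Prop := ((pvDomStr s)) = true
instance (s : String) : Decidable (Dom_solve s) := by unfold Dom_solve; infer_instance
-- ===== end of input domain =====

-- B replaces A's single seen-set scan with a two-phase decomposition: build the run-length keys, then check they are all distinct (same cost, simpler).


-- ===== PORT A =====
-- A's for-loop with early return, as structural recursion over (seen set, ans) state.
def solveLoop (cs : List Char) (sett : PySem.Set Char) (ans : List Char) : Bool × List Char :=
  match cs with
  | [] => (true, ans)
  | c :: rest =>
      if ¬ (PySem.Set.contains sett c = true) then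
        solveLoop rest (PySem.Set.add sett c) (ans ++ [c])
      else if PySem.List.pyGet? ans (-1) = some c then
        solveLoop rest sett ans
      else (false, [])

def solve (s : String) : Bool × List String :=
  let r := solveLoop s.toList PySem.Set.empty []
  (r.1, r.2.map (fun c => String.ofList [c]))

-- ===== PORT B =====
-- Source B phase 1: the run-length key list (keys[-1:] != [c] ↔ getLast? keys ≠ some c).
def runKeys (cs : List Char) : List Char :=
  cs.foldl (fun ks c => if ks.getLast? = some c then ks else ks ++ [c]) []

def solve_alt (s : String) : Bool × List String :=
  let keys := runKeys s.toList
  if PySem.Set.len (PySem.Set.ofList keys) = (keys.length : Int) then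
    (true, keys.map (fun c => String.ofList [c]))
  else (false, [])

-- ===== PRECONDITION & SPEC =====
def Spec_solve (s : String) (out : Bool × List String) : Prop := out = solve_alt s
instance (s : String) (out : Bool × List String) : Decidable (Spec_solve s out) := by unfold Spec_solve; infer_instance

-- ===== CLAIM (what is proved, stated in full; the proofs are below) =====
def Claim_equal_solve : Prop := ∀ (s : String), Dom_solve s → Spec_solve s (solve s)

-- ===== LEMMAS AND PROOFS =====

-- Run-length keys of cs, given the key of the run just before cs.
def runAux (prev : Option Char) : List Char → List Char
  | [] => []
  | c :: cs => if prev = some c then runAux prev cs else c :: runAux (some c) cs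

lemma runKeys_foldl (cs : List Char) : ∀ (ks : List Char),
    cs.foldl (fun ks c => if ks.getLast? = some c then ks else ks ++ [c]) ks
      = ks ++ runAux ks.getLast? cs := by
  induction cs with
  | nil => intro ks; simp [runAux]
  | cons c rest ih =>
      intro ks
      simp only [List.foldl_cons, runAux]
      by_cases h : ks.getLast? = some c
      · rw [if_pos h, if_pos h, ih]
      · rw [if_neg h, if_neg h, ih, List.getLast?_concat, List.append_assoc, List.singleton_append]

lemma solveLoop_char (cs : List Char) : ∀ (sett : PySem.Set Char) (ans : List Char),
    ans.Nodup → (∀ x, PySem.Set.contains sett x = true ↔ x ∈ ans) →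
    solveLoop cs sett ans =
      if (ans ++ runAux ans.getLast? cs).Nodup then (true, ans ++ runAux ans.getLast? cs)
      else (false, []) := by
  induction cs with
  | nil =>
      intro sett ans hnd _
      simp [solveLoop, runAux, hnd]
  | cons c rest ih =>
      intro sett ans hnd hinv
      by_cases hc : PySem.Set.contains sett c = true
      · -- c already seen, so c ∈ ans
        have hmem : c ∈ ans := (hinv c).mp hc
        by_cases hlast : ans.getLast? = some c
        · -- continue branch
          have : PySem.List.pyGet? ans (-1) = some c := by
            rw [PySem.List.pyGet?_neg_one]; exact hlast
          rw [solveLoop, if_neg (not_not_intro hc), if_pos this, ih sett ans hnd hinv]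
          simp [runAux, hlast]
        · -- failure branch
          have hget : ¬ PySem.List.pyGet? ans (-1) = some c := by
            rw [PySem.List.pyGet?_neg_one]; exact hlast
          rw [solveLoop, if_neg (not_not_intro hc), if_neg hget]
          have hne : ans.getLast? ≠ some c := hlast
          have : ¬ (ans ++ runAux ans.getLast? (c :: rest)).Nodup := by
            simp only [runAux, if_neg hne]
            intro hnd2
            exact (List.disjoint_of_nodup_append hnd2) hmem (List.mem_cons_self)
          rw [if_neg this]
      · -- new character
        have hnmem : c ∉ ans := fun h => hc ((hinv c).mpr h)
        have hne : ans.getLast? ≠ some c := by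
          intro h; exact hnmem (List.mem_of_getLast? h)
        have hnd' : (ans ++ [c]).Nodup :=
          hnd.append (List.nodup_singleton c) (by simp [List.disjoint_singleton, hnmem])
        have hinv' : ∀ x, PySem.Set.contains (PySem.Set.add sett c) x = true ↔ x ∈ ans ++ [c] := by
          intro x
          simp only [PySem.Set.add, PySem.Set.contains] at *
          rw [if_neg hc]
          simp only [List.contains_append, List.mem_append]
          constructor
          · intro h
            rcases Bool.or_eq_true_iff.mp h with h | h
            · exact Or.inl ((hinv x).mp h)
            · simp at h; simp [h]
          · intro h
            rcases h with h | h
            · exact Bool.or_eq_true_iff.mpr (Or.inl ((hinv x).mpr h))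
            · simp at h; simp [h]
        rw [solveLoop, if_pos hc, ih _ _ hnd' hinv']
        simp only [runAux, if_neg hne]
        rw [List.getLast?_concat, List.append_assoc, List.singleton_append]

lemma len_ofList_eq_iff (keys : List Char) :
    ((PySem.Set.ofList keys).length = keys.length) ↔ keys.Nodup := by
  have hnd := PySem.Set.nodup_ofList keys
  have hfin : (PySem.Set.ofList keys).toFinset = keys.toFinset := by
    ext x; simp [List.mem_toFinset, PySem.Set.mem_ofList]
  have h1 : (PySem.Set.ofList keys).length = keys.dedup.length := by
    rw [← List.toFinset_card_of_nodup hnd, hfin, List.card_toFinset]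
  constructor
  · intro h
    rw [h1] at h
    exact List.dedup_eq_self.mp ((List.dedup_sublist keys).eq_of_length h)
  · intro h
    rw [h1, List.dedup_eq_self.mpr h]

-- ===== VERDICT (by name: the statement is the Claim_ definition above) =====
theorem solve_spec : Claim_equal_solve := by
  intro s _
  unfold Spec_solve solve solve_alt
  have hloop := solveLoop_char s.toList PySem.Set.empty [] List.nodup_nil
    (by intro x; simp [PySem.Set.contains, PySem.Set.empty])
  have hkeys : runKeys s.toList = runAux none s.toList := by
    simpa [runKeys] using runKeys_foldl s.toList []
  simp only [PySem.Set.empty, List.nil_append, List.getLast?_nil] at hloop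
  by_cases h : (runAux none s.toList).Nodup
  · have hQ : (PySem.Set.ofList (runAux none s.toList)).length = (runAux none s.toList).length :=
      (len_ofList_eq_iff _).mpr h
    simp [hloop, hkeys, h, hQ]
  · have hQ : ¬ (PySem.Set.ofList (runAux none s.toList)).length = (runAux none s.toList).length :=
      fun hc => h ((len_ofList_eq_iff _).mp hc)
    simp [hloop, hkeys, h, hQ]
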